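-- pv_equiv track=rewrite | github.com/bhofmei/analysis-scripts | methyl/analyze_dmr_generations.py | calculateMarginalSums
-- ===== SOURCE A (Python) =====
-- def calculateMarginalSums( inMatrix ):
-- 	'''
-- 		compute row, column, and total marginal sums for a matrix
-- 		used to compute expected values matrix
-- 	'''
-- 	rowSums = [ 0 ] * len(inMatrix)
-- 	colSums = [ 0 ] * len(inMatrix[0])
-- 	# loop through matrix
-- 	for i in range(len(inMatrix)):
-- 		for j in range(len(inMatrix[0])):
-- 			rowSums[i] += inMatrix[i][j]
-- 			colSums[j] += inMatrix[i][j]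
-- 	return rowSums, colSums, sum(rowSums)
-- ===== SOURCE B (Python) =====
-- def calculateMarginalSums(inMatrix):
--     rowSums = [sum(inMatrix[i][j] for j in range(len(inMatrix[0]))) for i in range(len(inMatrix))]
--     colSums = [sum(inMatrix[i][j] for i in range(len(inMatrix))) for j in range(len(inMatrix[0]))]
--     return rowSums, colSums, sum(rowSums)
-- ===== Notes on version B (the rewrite author's own statement) =====
-- stated objective: simpler
-- what changed: A builds both marginals in one nested mutate-in-place scan over index pairs; B computes each marginal directly as its own comprehension of sums (one row-major pass, one column-major pass), with no mutable accumulators.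
import Mathlib
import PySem

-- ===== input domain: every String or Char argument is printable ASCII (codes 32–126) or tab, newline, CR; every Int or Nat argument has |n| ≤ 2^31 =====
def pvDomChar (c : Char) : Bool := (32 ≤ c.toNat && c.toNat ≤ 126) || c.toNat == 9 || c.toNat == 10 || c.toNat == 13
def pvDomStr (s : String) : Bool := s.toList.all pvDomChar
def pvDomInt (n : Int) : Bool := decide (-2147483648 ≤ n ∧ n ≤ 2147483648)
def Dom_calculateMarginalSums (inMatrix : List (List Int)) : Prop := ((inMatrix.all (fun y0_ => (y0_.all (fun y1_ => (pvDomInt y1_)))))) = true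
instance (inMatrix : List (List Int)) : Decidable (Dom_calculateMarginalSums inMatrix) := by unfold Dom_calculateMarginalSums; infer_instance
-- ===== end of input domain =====

-- B replaces A's single mutate-in-place nested scan by three direct comprehensions
-- (row sums, column sums, total); same cost, no mutable accumulators (objective: simpler).

-- ===== PORT A =====
-- literal port: rowSums/colSums start as zero lists, the nested i/j loop adds
-- inMatrix[i][j] (written twice, as in A) into both; inside Pre_ every index is
-- in range, so the getD defaults are never taken.
def calculateMarginalSums (inMatrix : List (List Int)) : List Int × List Int × Int :=
  let p := (List.range inMatrix.length).foldl (fun p i =>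
      (List.range (inMatrix.headD []).length).foldl (fun (p : List Int × List Int) j =>
        (p.1.set i (p.1.getD i 0 + (inMatrix.getD i []).getD j 0),
         p.2.set j (p.2.getD j 0 + (inMatrix.getD i []).getD j 0))) p)
    (List.replicate inMatrix.length (0 : Int),
     List.replicate (inMatrix.headD []).length (0 : Int))
  (p.1, p.2, p.1.sum)

-- ===== PORT B =====
def calculateMarginalSums_alt (inMatrix : List (List Int)) : List Int × List Int × Int :=
  let rowSums := (List.range inMatrix.length).map (fun i =>
    ((List.range (inMatrix.headD []).length).map (fun j =>
      (inMatrix.getD i []).getD j 0)).sum)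
  let colSums := (List.range (inMatrix.headD []).length).map (fun j =>
    ((List.range inMatrix.length).map (fun i =>
      (inMatrix.getD i []).getD j 0)).sum)
  (rowSums, colSums, rowSums.sum)

-- ===== PRECONDITION & SPEC =====
-- Pre_ excludes exactly the inputs where the Python A raises IndexError: the empty
-- matrix (on inMatrix[0]) and matrices with a row shorter than row 0 (on inMatrix[i][j]).
def Pre_calculateMarginalSums (inMatrix : List (List Int)) : Prop :=
  inMatrix ≠ [] ∧ ∀ row ∈ inMatrix, (inMatrix.headD []).length ≤ row.length
instance (inMatrix : List (List Int)) : Decidable (Pre_calculateMarginalSums inMatrix) := by unfold Pre_calculateMarginalSums; infer_instance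
def pvWitness_calculateMarginalSums : List (List Int) := [[1, 2], [3, 4], [5, 6]]

def Spec_calculateMarginalSums (inMatrix : List (List Int)) (out : List Int × List Int × Int) : Prop := out = calculateMarginalSums_alt inMatrix
instance (inMatrix : List (List Int)) (out : List Int × List Int × Int) : Decidable (Spec_calculateMarginalSums inMatrix out) := by unfold Spec_calculateMarginalSums; infer_instance

-- ===== CLAIM (what is proved, stated in full; the proofs are below) =====
def Claim_equal_calculateMarginalSums : Prop := ∀ (inMatrix : List (List Int)), Dom_calculateMarginalSums inMatrix → Pre_calculateMarginalSums inMatrix → Spec_calculateMarginalSums inMatrix (calculateMarginalSums inMatrix)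

-- ===== LEMMAS AND PROOFS =====

-- a fold over a pair whose components evolve independently splits into two folds
theorem pvFoldPairSep {α : Type} (f g : List Int → α → List Int) :
    ∀ (l : List α) (a b : List Int),
      l.foldl (fun (p : List Int × List Int) i => (f p.1 i, g p.2 i)) (a, b)
        = (l.foldl f a, l.foldl g b) := by
  intro l
  induction l with
  | nil => intro a b; rfl
  | cons h t ih => intro a b; simpa using ih (f a h) (g b h)

-- a list is the map of its getD over its index range
theorem pvMapGetD (cs : List Int) :
    (List.range cs.length).map (fun j => cs.getD j 0) = cs := by
  apply List.ext_getElem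
  · simp
  · intro i h1 h2
    simp [List.getD_eq_getElem?_getD, h2]

theorem pvGetDMapRange (k j : Nat) (f : Nat → Int) (hj : j < k) :
    (((List.range k).map f).getD j 0) = f j := by
  simp [List.getD_eq_getElem?_getD, hj]

-- the "set each index in order" fold, characterised pointwise
theorem pvFoldSet (y : Nat → Int) :
    ∀ (m : Nat) (cs : List Int),
      (List.range m).foldl (fun l j => l.set j (l.getD j 0 + y j)) cs
        = (List.range cs.length).map (fun j => cs.getD j 0 + if j < m then y j else 0) := by
  intro m
  induction m with
  | zero =>
      intro cs
      simpa using (pvMapGetD cs).symm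
  | succ m ih =>
      intro cs
      rw [List.range_succ, List.foldl_append, ih]
      simp only [List.foldl_cons, List.foldl_nil]
      by_cases hm : m < cs.length
      · apply List.ext_getElem
        · simp
        · intro i h1 h2
          simp only [List.length_map, List.length_range] at h2
          simp only [List.getElem_set, List.getElem_map, List.getElem_range]
          by_cases him : m = i
          · subst him
            rw [if_pos rfl, pvGetDMapRange _ _ _ hm]
            simp [hm]
          · rw [if_neg him]
            congr 1
            by_cases hi : i < m
            · simp [hi, show i < m + 1 by omega]
            · simp [hi, show ¬ i < m + 1 by omega]
      · rw [List.set_eq_of_length_le (by simp; omega)]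
        apply List.map_congr_left
        intro j hj
        rw [List.mem_range] at hj
        congr 1
        simp [show j < m by omega, show j < m + 1 by omega]

-- inner row loop: repeatedly bumping index i collapses to one set of the row sum
theorem pvFoldRowInner (i : Nat) (x : Nat → Int) :
    ∀ (k : Nat) (rs : List Int),
      (List.range k).foldl (fun rs j => rs.set i (rs.getD i 0 + x j)) rs
        = rs.set i (rs.getD i 0 + ((List.range k).map x).sum) := by
  intro k
  induction k with
  | zero =>
      intro rs
      by_cases h : i < rs.length
      · simp only [List.range_zero, List.foldl_nil, List.map_nil, List.sum_nil, add_zero]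
        rw [List.getD_eq_getElem?_getD, List.getElem?_eq_getElem h]
        exact (List.set_getElem_self h).symm
      · simp [List.set_eq_of_length_le (by omega : rs.length ≤ i)]
  | succ k ih =>
      intro rs
      rw [List.range_succ, List.foldl_append, ih]
      simp only [List.foldl_cons, List.foldl_nil, List.map_append, List.sum_append,
        List.map_cons, List.map_nil, List.sum_cons, List.sum_nil, add_zero]
      by_cases h : i < rs.length
      · rw [List.set_set]
        congr 1
        have hg : (rs.set i (rs.getD i 0 + ((List.range k).map x).sum)).getD i 0
            = rs.getD i 0 + ((List.range k).map x).sum := by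
          simp [List.getD_eq_getElem?_getD, h]
        rw [hg, add_assoc]
      · have hle : rs.length ≤ i := by omega
        rw [List.set_eq_of_length_le hle, List.set_eq_of_length_le hle,
          List.set_eq_of_length_le hle]

-- column accumulation over the first m rows
theorem pvColFold (k : Nat) (x : Nat → Nat → Int) :
    ∀ (m : Nat),
      (List.range m).foldl (fun cs i =>
          (List.range k).foldl (fun cs j => cs.set j (cs.getD j 0 + x i j)) cs)
        (List.replicate k (0 : Int))
        = (List.range k).map (fun j => ((List.range m).map (fun i => x i j)).sum) := by
  intro m
  induction m with
  | zero =>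
      apply List.ext_getElem <;> simp
  | succ m ih =>
      rw [List.range_succ, List.foldl_append, ih]
      simp only [List.foldl_cons, List.foldl_nil]
      rw [pvFoldSet]
      simp only [List.length_map, List.length_range]
      apply List.map_congr_left
      intro j hj
      rw [List.mem_range] at hj
      rw [pvGetDMapRange _ _ _ hj, if_pos hj]
      simp

-- ===== VERDICT (by name: the statement is the Claim_ definition above) =====
theorem calculateMarginalSums_spec : Claim_equal_calculateMarginalSums := by
  intro inMatrix _ _
  unfold Spec_calculateMarginalSums
  simp only [calculateMarginalSums, calculateMarginalSums_alt]
  have hsep :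
      (List.range inMatrix.length).foldl (fun p i =>
          (List.range (inMatrix.headD []).length).foldl (fun (p : List Int × List Int) j =>
            (p.1.set i (p.1.getD i 0 + (inMatrix.getD i []).getD j 0),
             p.2.set j (p.2.getD j 0 + (inMatrix.getD i []).getD j 0))) p)
        (List.replicate inMatrix.length (0 : Int),
         List.replicate (inMatrix.headD []).length (0 : Int))
      = ((List.range inMatrix.length).foldl (fun rs i =>
            (List.range (inMatrix.headD []).length).foldl (fun rs j =>
              rs.set i (rs.getD i 0 + (inMatrix.getD i []).getD j 0)) rs)
          (List.replicate inMatrix.length (0 : Int)),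
         (List.range inMatrix.length).foldl (fun cs i =>
            (List.range (inMatrix.headD []).length).foldl (fun cs j =>
              cs.set j (cs.getD j 0 + (inMatrix.getD i []).getD j 0)) cs)
          (List.replicate (inMatrix.headD []).length (0 : Int))) := by
    have hstep : (fun (p : List Int × List Int) (i : Nat) =>
          (List.range (inMatrix.headD []).length).foldl (fun (p : List Int × List Int) j =>
            (p.1.set i (p.1.getD i 0 + (inMatrix.getD i []).getD j 0),
             p.2.set j (p.2.getD j 0 + (inMatrix.getD i []).getD j 0))) p)
        = fun (p : List Int × List Int) (i : Nat) =>
          ((List.range (inMatrix.headD []).length).foldl (fun rs j =>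
              rs.set i (rs.getD i 0 + (inMatrix.getD i []).getD j 0)) p.1,
           (List.range (inMatrix.headD []).length).foldl (fun cs j =>
              cs.set j (cs.getD j 0 + (inMatrix.getD i []).getD j 0)) p.2) := by
      funext p i
      exact pvFoldPairSep (fun rs j => rs.set i (rs.getD i 0 + (inMatrix.getD i []).getD j 0))
        (fun cs j => cs.set j (cs.getD j 0 + (inMatrix.getD i []).getD j 0))
        (List.range (inMatrix.headD []).length) p.1 p.2
    rw [hstep]
    exact pvFoldPairSep
      (fun rs i => (List.range (inMatrix.headD []).length).foldl (fun rs j =>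
        rs.set i (rs.getD i 0 + (inMatrix.getD i []).getD j 0)) rs)
      (fun cs i => (List.range (inMatrix.headD []).length).foldl (fun cs j =>
        cs.set j (cs.getD j 0 + (inMatrix.getD i []).getD j 0)) cs)
      (List.range inMatrix.length)
      (List.replicate inMatrix.length (0 : Int))
      (List.replicate (inMatrix.headD []).length (0 : Int))
  rw [hsep]
  have hrow : (List.range inMatrix.length).foldl (fun rs i =>
        (List.range (inMatrix.headD []).length).foldl (fun rs j =>
          rs.set i (rs.getD i 0 + (inMatrix.getD i []).getD j 0)) rs)
      (List.replicate inMatrix.length (0 : Int))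
      = (List.range inMatrix.length).map (fun i =>
          ((List.range (inMatrix.headD []).length).map (fun j =>
            (inMatrix.getD i []).getD j 0)).sum) := by
    have hstep : (fun (rs : List Int) (i : Nat) =>
          (List.range (inMatrix.headD []).length).foldl (fun rs j =>
            rs.set i (rs.getD i 0 + (inMatrix.getD i []).getD j 0)) rs)
        = fun rs i => rs.set i (rs.getD i 0 +
            ((List.range (inMatrix.headD []).length).map (fun j =>
              (inMatrix.getD i []).getD j 0)).sum) := by
      funext rs i
      exact pvFoldRowInner i _ (inMatrix.headD []).length rs
    rw [hstep, pvFoldSet]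
    simp only [List.length_replicate]
    apply List.map_congr_left
    intro i hi
    rw [List.mem_range] at hi
    simp [List.getD_eq_getElem?_getD, hi]
  have hcol := pvColFold (inMatrix.headD []).length
    (fun i j => (inMatrix.getD i []).getD j 0) inMatrix.length
  rw [hrow, hcol]
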